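-- pv_equiv track=rewrite | github.com/iamyokwejuste/reckot | apps/payments/gateways/base.py | detect_carrier
-- ===== SOURCE A (Python) =====
-- def detect_carrier(phone: str) -> str:
--     phone = "".join(filter(str.isdigit, phone))
--     if phone.startswith("237"):
--         phone = phone[3:]
--
--     if len(phone) < 2:
--         return "UNKNOWN"
--
--     mtn_prefixes = [
--         "67",
--         "650",
--         "651",
--         "652",
--         "653",
--         "654",
--         "680",
--         "681",
--         "682",
--         "683",
--     ]
--     orange_prefixes = [
--         "640",
--         "655",
--         "656",
--         "657",
--         "658",
--         "659",
--         "686",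
--         "687",
--         "688",
--         "689",
--         "69",
--     ]
--
--     for p in mtn_prefixes:
--         if phone.startswith(p):
--             return "MTN"
--
--     for p in orange_prefixes:
--         if phone.startswith(p):
--             return "ORANGE"
--
--     return "UNKNOWN"
-- ===== SOURCE B (Python) =====
-- def detect_carrier(phone: str) -> str:
--     digits = "".join(ch for ch in phone if ch.isdigit())
--     if digits.startswith("237"):
--         digits = digits[3:]
--
--     if len(digits) < 2:
--         return "UNKNOWN"
--
--     # classify arithmetically by the numeric value of the 2- and 3-digit prefix
--     two = int(digits[:2])
--     if two == 67:
--         return "MTN"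
--     if two == 69:
--         return "ORANGE"
--     if len(digits) >= 3:
--         three = int(digits[:3])
--         if 650 <= three <= 654 or 680 <= three <= 683:
--             return "MTN"
--         if three == 640 or 655 <= three <= 659 or 686 <= three <= 689:
--             return "ORANGE"
--     return "UNKNOWN"
-- ===== Notes on version B (the rewrite author's own statement) =====
-- stated objective: alternative
-- what changed: Replaces the two linear scans over hard-coded prefix string lists by an arithmetic classification: parse the 2- and 3-digit prefix as integers and test them against numeric ranges (67/69, 650-654, 680-683, 640, 655-659, 686-689).
import Mathlib
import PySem

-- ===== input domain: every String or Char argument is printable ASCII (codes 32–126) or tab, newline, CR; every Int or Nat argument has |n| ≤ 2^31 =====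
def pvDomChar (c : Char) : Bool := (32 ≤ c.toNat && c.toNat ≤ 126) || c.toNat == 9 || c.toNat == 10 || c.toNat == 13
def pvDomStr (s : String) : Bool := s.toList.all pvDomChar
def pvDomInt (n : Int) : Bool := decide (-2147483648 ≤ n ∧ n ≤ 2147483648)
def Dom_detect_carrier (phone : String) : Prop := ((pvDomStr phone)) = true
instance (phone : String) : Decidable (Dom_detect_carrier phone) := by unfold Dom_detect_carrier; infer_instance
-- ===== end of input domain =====

-- B replaces A's two prefix-scan loops by an arithmetic classification of the numeric
-- value of the 2- and 3-digit prefix (alternative decomposition, same cost).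


-- ===== PORT A =====
-- the two 'for p in …: if phone.startswith(p): return …' loops, as structural recursion
def pvStartsAny (s : List Char) : List (List Char) → Bool
  | [] => false
  | q :: rest => if PySem.Chars.startswith s q then true else pvStartsAny s rest

-- the body of A after the digit-filter / '237'-strip preprocessing
def pvClassifyA (q : List Char) : String :=
  if q.length < 2 then "UNKNOWN"
  else
    let mtn : List (List Char) :=
      [['6','7'],['6','5','0'],['6','5','1'],['6','5','2'],['6','5','3'],['6','5','4'],
       ['6','8','0'],['6','8','1'],['6','8','2'],['6','8','3']]
    let orange : List (List Char) :=
      [['6','4','0'],['6','5','5'],['6','5','6'],['6','5','7'],['6','5','8'],['6','5','9'],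
       ['6','8','6'],['6','8','7'],['6','8','8'],['6','8','9'],['6','9']]
    if pvStartsAny q mtn then "MTN"
    else if pvStartsAny q orange then "ORANGE"
    else "UNKNOWN"

def detect_carrier (phone : String) : String :=
  let d0 := phone.toList.filter PySem.Chars.isdigit
  let d := if PySem.Chars.startswith d0 ['2','3','7'] then PySem.List.slice d0 (some 3) none else d0
  pvClassifyA d

-- ===== PORT B =====
-- the body of B after the (identical) preprocessing; int() cannot raise here (the slices
-- are nonempty all-digit strings), so ofChars? is some and .getD 0 is exact
def pvClassifyB (q : List Char) : String :=
  if q.length < 2 then "UNKNOWN"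
  else
    let two := (PySem.Int.ofChars? (PySem.List.slice q none (some 2))).getD 0
    if two = 67 then "MTN"
    else if two = 69 then "ORANGE"
    else if 3 ≤ q.length then
      let three := (PySem.Int.ofChars? (PySem.List.slice q none (some 3))).getD 0
      if (650 ≤ three ∧ three ≤ 654) ∨ (680 ≤ three ∧ three ≤ 683) then "MTN"
      else if three = 640 ∨ (655 ≤ three ∧ three ≤ 659) ∨ (686 ≤ three ∧ three ≤ 689) then "ORANGE"
      else "UNKNOWN"
    else "UNKNOWN"

def detect_carrier_alt (phone : String) : String :=
  let d0 := phone.toList.filter PySem.Chars.isdigit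
  let d := if PySem.Chars.startswith d0 ['2','3','7'] then PySem.List.slice d0 (some 3) none else d0
  pvClassifyB d

-- ===== PRECONDITION & SPEC =====
def Spec_detect_carrier (phone : String) (out : String) : Prop := out = detect_carrier_alt phone
instance (phone : String) (out : String) : Decidable (Spec_detect_carrier phone out) := by unfold Spec_detect_carrier; infer_instance

-- ===== CLAIM (what is proved, stated in full; the proofs are below) =====
def Claim_equal_detect_carrier : Prop := ∀ (phone : String), Dom_detect_carrier phone → Spec_detect_carrier phone (detect_carrier phone)

-- ===== LEMMAS AND PROOFS =====

theorem digit_mem (c : Char) (h : PySem.Chars.isdigit c = true) :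
    c ∈ ['0','1','2','3','4','5','6','7','8','9'] := by
  simp [PySem.Chars.isdigit, Char.le_def] at h
  obtain ⟨h1, h2⟩ := h
  have h1' : 48 ≤ c.toNat := Nat.succ_le_of_lt h1
  have h2' : c.toNat ≤ 57 := Fin.mk_le_mk.mp h2
  have he := Char.ofNat_toNat c
  set n := c.toNat with hn
  interval_cases n <;> rw [← he] <;> decide

theorem slice_two (q : List Char) : PySem.List.slice q none (some 2) = q.take 2 := by
  exact_mod_cast PySem.List.slice_to_natCast q 2

theorem slice_three (q : List Char) : PySem.List.slice q none (some 3) = q.take 3 := by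
  exact_mod_cast PySem.List.slice_to_natCast q 3

-- both classifiers look only at the first three characters
theorem classifyA_take3 (c0 c1 c2 : Char) (r : List Char) :
    pvClassifyA (c0 :: c1 :: c2 :: r) = pvClassifyA [c0, c1, c2] := by
  simp [pvClassifyA, pvStartsAny, PySem.Chars.startswith, List.isPrefixOf]

theorem classifyB_take3 (c0 c1 c2 : Char) (r : List Char) :
    pvClassifyB (c0 :: c1 :: c2 :: r) = pvClassifyB [c0, c1, c2] := by
  simp [pvClassifyB, slice_two, slice_three]

theorem classify_eq_pairs (a b : Char)
    (ha : a ∈ ['0','1','2','3','4','5','6','7','8','9'])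
    (hb : b ∈ ['0','1','2','3','4','5','6','7','8','9']) :
    pvClassifyA [a, b] = pvClassifyB [a, b] := by
  fin_cases ha <;> fin_cases hb <;> rfl

set_option maxHeartbeats 4000000 in
theorem classify_eq_triples (a b c : Char)
    (ha : a ∈ ['0','1','2','3','4','5','6','7','8','9'])
    (hb : b ∈ ['0','1','2','3','4','5','6','7','8','9'])
    (hc : c ∈ ['0','1','2','3','4','5','6','7','8','9']) :
    pvClassifyA [a, b, c] = pvClassifyB [a, b, c] := by
  fin_cases ha <;> fin_cases hb <;> fin_cases hc <;> rfl

theorem classify_eq (q : List Char) (hq : ∀ c ∈ q, PySem.Chars.isdigit c = true) :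
    pvClassifyA q = pvClassifyB q := by
  match q with
  | [] => rfl
  | [_] => rfl
  | [a, b] =>
      exact classify_eq_pairs a b (digit_mem a (hq a (by simp))) (digit_mem b (hq b (by simp)))
  | a :: b :: c :: r =>
      rw [classifyA_take3, classifyB_take3]
      exact classify_eq_triples a b c (digit_mem a (hq a (by simp))) (digit_mem b (hq b (by simp)))
        (digit_mem c (hq c (by simp)))

-- ===== VERDICT (by name: the statement is the Claim_ definition above) =====
theorem detect_carrier_spec : Claim_equal_detect_carrier := by
  intro phone _
  unfold Spec_detect_carrier detect_carrier detect_carrier_alt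
  apply classify_eq
  intro c hc
  split at hc
  · have h3 : PySem.List.slice (phone.toList.filter PySem.Chars.isdigit) (some 3) none
        = (phone.toList.filter PySem.Chars.isdigit).drop 3 := by
      exact_mod_cast PySem.List.slice_from_natCast (phone.toList.filter PySem.Chars.isdigit) 3
    rw [h3] at hc
    exact List.of_mem_filter (List.mem_of_mem_drop hc)
  · exact List.of_mem_filter hc
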